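-- pv_equiv track=rewrite | github.com/tony9402/baekjoon | solution/implementation/16935/main.py | fun6
-- ===== SOURCE A (Python) =====
-- def fun6(arr):
--     r_num = len(arr)
--     c_num = len(arr[0])
--     h_rn = r_num // 2
--     h_cn = c_num // 2
--     temp = [[0] * c_num for _ in range(r_num)]
--     for row in range(r_num):
--         for col in range(c_num):
--             if row < h_rn and col < h_cn:
--                 temp[row][col] = arr[row][col + h_cn]
--             elif row < h_rn and col >= h_cn:
--                 temp[row][col] = arr[row + h_rn][col]
--             elif row >= h_rn and col < h_cn:
--                 temp[row][col] = arr[row - h_rn][col]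
--             elif row >= h_rn and col >= h_cn:
--                 temp[row][col] = arr[row][col - h_cn]
--     return temp
-- ===== SOURCE B (Python) =====
-- def fun6(arr):
--     r_num = len(arr)
--     c_num = len(arr[0])
--     h_rn = r_num // 2
--     h_cn = c_num // 2
--     top = [arr[row][h_cn:2 * h_cn] + arr[row + h_rn][h_cn:c_num]
--            for row in range(h_rn)]
--     bot = [arr[i][0:h_cn] + arr[h_rn + i][0:c_num - h_cn]
--            for i in range(r_num - h_rn)]
--     return top + bot
-- ===== Notes on version B (the rewrite author's own statement) =====
-- stated objective: simpler
-- what changed: Replaces the nested row/column loop with a per-element four-way branch writing into a preallocated zero matrix by a single pass over output row indices that builds each row as a concatenation of two list slices (bulk C-level copies instead of per-element Python branching).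
import Mathlib
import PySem

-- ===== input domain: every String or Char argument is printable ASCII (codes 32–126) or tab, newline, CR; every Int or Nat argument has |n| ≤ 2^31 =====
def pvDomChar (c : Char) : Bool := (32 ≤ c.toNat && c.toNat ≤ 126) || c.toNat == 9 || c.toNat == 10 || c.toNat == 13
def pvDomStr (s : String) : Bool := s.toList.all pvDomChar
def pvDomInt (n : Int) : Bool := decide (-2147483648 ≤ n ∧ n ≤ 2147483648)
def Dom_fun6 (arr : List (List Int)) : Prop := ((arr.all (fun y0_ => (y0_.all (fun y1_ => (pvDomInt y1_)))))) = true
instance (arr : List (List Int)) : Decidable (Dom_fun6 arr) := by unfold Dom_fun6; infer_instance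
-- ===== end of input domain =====

-- B builds each output row in one pass as a concatenation of two slices of the input,
-- replacing A's preallocated zero matrix and nested row/column loop with a four-way branch (objective: simpler).

-- ===== PORT A =====
-- arr[i][j] for in-range nonnegative indices (Pre_ guarantees in-range)
def pyAt (arr : List (List Int)) (i j : Nat) : Int :=
  PySem.List.pyGetD (PySem.List.pyGetD arr (i : Int) []) (j : Int) 0

def fun6 (arr : List (List Int)) : List (List Int) :=
  let r_num := arr.length
  let c_num := (PySem.List.pyGetD arr 0 ([] : List Int)).length
  let h_rn := r_num / 2
  let h_cn := c_num / 2
  let temp := List.replicate r_num (List.replicate c_num (0 : Int))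
  (List.range r_num).foldl (fun t row =>
    (List.range c_num).foldl (fun t col =>
      if row < h_rn ∧ col < h_cn then
        t.modify row (fun r => r.set col (pyAt arr row (col + h_cn)))
      else if row < h_rn ∧ h_cn ≤ col then
        t.modify row (fun r => r.set col (pyAt arr (row + h_rn) col))
      else if h_rn ≤ row ∧ col < h_cn then
        t.modify row (fun r => r.set col (pyAt arr (row - h_rn) col))
      else if h_rn ≤ row ∧ h_cn ≤ col then
        t.modify row (fun r => r.set col (pyAt arr row (col - h_cn)))
      else t) t) temp

-- ===== PORT B =====
def fun6_alt (arr : List (List Int)) : List (List Int) :=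
  let r_num := arr.length
  let c_num := (PySem.List.pyGetD arr 0 ([] : List Int)).length
  let h_rn := r_num / 2
  let h_cn := c_num / 2
  let top := (List.range h_rn).map (fun (row : Nat) =>
    PySem.List.slice (PySem.List.pyGetD arr (row : Int) []) (some (h_cn : Int)) (some ((2 * h_cn : Nat) : Int)) ++
    PySem.List.slice (PySem.List.pyGetD arr (Nat.cast (row + h_rn) : Int) []) (some (h_cn : Int)) (some (c_num : Int)))
  let bot := (List.range (r_num - h_rn)).map (fun (i : Nat) =>
    PySem.List.slice (PySem.List.pyGetD arr (i : Int) []) (some (0 : Int)) (some (h_cn : Int)) ++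
    PySem.List.slice (PySem.List.pyGetD arr (Nat.cast (h_rn + i) : Int) []) (some (0 : Int)) (some ((c_num - h_cn : Nat) : Int)))
  top ++ bot

-- ===== PRECONDITION & SPEC =====
-- Exactly the inputs on which A returns: arr is nonempty (A raises IndexError on arr[0] otherwise)
-- and every index A reads is in range (so A raises IndexError on rows that are too short).
def Pre_fun6 (arr : List (List Int)) : Prop :=
  arr ≠ [] ∧
  (∀ j, j < arr.length / 2 →
    2 * ((arr.headD []).length / 2) ≤ (arr.getD j []).length) ∧
  (∀ j, j < 2 * (arr.length / 2) → arr.length / 2 ≤ j →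
    (arr.headD []).length ≤ (arr.getD j []).length) ∧
  (∀ j, j < arr.length - arr.length / 2 →
    (arr.headD []).length / 2 ≤ (arr.getD j []).length) ∧
  (∀ j, j < arr.length → arr.length / 2 ≤ j →
    (arr.headD []).length - (arr.headD []).length / 2 ≤ (arr.getD j []).length)
instance (arr : List (List Int)) : Decidable (Pre_fun6 arr) := by unfold Pre_fun6; infer_instance

def pvWitness_fun6 : List (List Int) := [[1, 2], [3, 4]]

def Spec_fun6 (arr : List (List Int)) (out : List (List Int)) : Prop := out = fun6_alt arr
instance (arr : List (List Int)) (out : List (List Int)) : Decidable (Spec_fun6 arr out) := by unfold Spec_fun6; infer_instance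

-- ===== CLAIM (what is proved, stated in full; the proofs are below) =====
def Claim_equal_fun6 : Prop := ∀ (arr : List (List Int)), Dom_fun6 arr → Pre_fun6 arr → Spec_fun6 arr (fun6 arr)

-- ===== LEMMAS AND PROOFS =====

-- the value A writes at output position (row, col)
def fVal (arr : List (List Int)) (h_rn h_cn row col : Nat) : Int :=
  if row < h_rn then
    (if col < h_cn then pyAt arr row (col + h_cn) else pyAt arr (row + h_rn) col)
  else
    (if col < h_cn then pyAt arr (row - h_rn) col else pyAt arr row (col - h_cn))

-- A's inner-loop step is a single modify with fVal
lemma step_eq (arr : List (List Int)) (h_rn h_cn row : Nat) (t : List (List Int)) (col : Nat) :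
    (if row < h_rn ∧ col < h_cn then
        t.modify row (fun r => r.set col (pyAt arr row (col + h_cn)))
      else if row < h_rn ∧ h_cn ≤ col then
        t.modify row (fun r => r.set col (pyAt arr (row + h_rn) col))
      else if h_rn ≤ row ∧ col < h_cn then
        t.modify row (fun r => r.set col (pyAt arr (row - h_rn) col))
      else if h_rn ≤ row ∧ h_cn ≤ col then
        t.modify row (fun r => r.set col (pyAt arr row (col - h_cn)))
      else t) = t.modify row (fun r => r.set col (fVal arr h_rn h_cn row col)) := by
  by_cases h1 : row < h_rn <;> by_cases h2 : col < h_cn <;>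
    simp [fVal, h1, h2]

-- pull the modify out of a foldl that always modifies the same index
lemma foldl_modify_out {α β : Type} (row : Nat) (G : β → α → α) :
    ∀ (xs : List β) (t : List α),
      xs.foldl (fun t x => t.modify row (G x)) t
        = t.modify row (fun a => xs.foldl (fun a x => G x a) a) := by
  intro xs
  induction xs with
  | nil =>
    intro t
    apply List.ext_getElem (by simp)
    intro i hi _
    simp [List.getElem_modify]
  | cons x xs ih =>
    intro t
    simp only [List.foldl_cons, ih]
    apply List.ext_getElem (by simp)
    intro i hi _
    by_cases h : row = i
    · simp [h]
    · simp [h]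

-- a foldl of modify over range n is a mapIdx
lemma foldl_modify_range {α : Type} (F : Nat → α → α) :
    ∀ (n : Nat) (t : List α),
      (List.range n).foldl (fun t i => t.modify i (F i)) t
        = t.mapIdx (fun i a => if i < n then F i a else a) := by
  intro n
  induction n with
  | zero =>
    intro t
    apply List.ext_getElem (by simp)
    intro i hi _
    simp
  | succ n ih =>
    intro t
    rw [List.range_succ, List.foldl_append, List.foldl_cons, List.foldl_nil, ih]
    apply List.ext_getElem (by simp)
    intro i hi _
    by_cases h : i = n <;>
      simp only [List.getElem_modify, List.getElem_mapIdx, h] <;> split_ifs <;>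
        first | rfl | omega

-- setting every position 0..m-1 of a long-enough list
lemma foldl_set_range (g : Nat → Int) :
    ∀ (m : Nat) (r : List Int), m ≤ r.length →
      (List.range m).foldl (fun r col => r.set col (g col)) r
        = (List.range m).map g ++ r.drop m := by
  intro m
  induction m with
  | zero => intro r _; simp
  | succ m ih =>
    intro r hm
    rw [List.range_succ, List.foldl_append, List.foldl_cons, List.foldl_nil,
      ih r (by omega), List.set_append]
    simp only [List.length_map, List.length_range, lt_irrefl, if_false, Nat.sub_self]
    rw [List.drop_eq_getElem_cons (show m < r.length by omega), List.set_cons_zero]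
    simp [List.map_append, List.append_assoc]

-- a slice of a row as a map over range
lemma drop_take_map (xs : List Int) (a b : Nat) (h : a + b ≤ xs.length) :
    (xs.drop a).take b = (List.range b).map (fun j => xs.getD (a + j) 0) := by
  apply List.ext_getElem
  · simp; omega
  · intro i hi hi'
    simp only [List.getElem_take, List.getElem_drop, List.getElem_map, List.getElem_range]
    rw [List.getD_eq_getElem _ _ (by simp at hi ⊢; omega)]

-- a take as a map over range
lemma take_map (xs : List Int) (b : Nat) (h : b ≤ xs.length) :
    xs.take b = (List.range b).map (fun j => xs.getD j 0) := by
  simpa using drop_take_map xs 0 b (by omega)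

-- split a map over range at h
lemma map_range_split {α : Type} (f : Nat → α) (c h : Nat) (hh : h ≤ c) :
    (List.range c).map f = (List.range h).map f ++ (List.range (c - h)).map (fun j => f (h + j)) := by
  rw [show c = h + (c - h) by omega, List.range_add, List.map_append, List.map_map]
  simp [Function.comp]

theorem fun6_spec : Claim_equal_fun6 := by
  intro arr _ hpre
  obtain ⟨hne, hb1, hb2, hb3, hb4⟩ := hpre
  unfold Spec_fun6 fun6 fun6_alt
  have hc0 : PySem.List.pyGetD arr 0 ([] : List Int) = arr.headD [] := by
    cases arr with
    | nil => simp at hne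
    | cons a l => simp [PySem.List.pyGetD_zero]
  rw [hc0]
  simp only [step_eq, foldl_modify_out, foldl_modify_range]
  simp only [PySem.List.pyGetD_natCast]
  set n := arr.length with hn
  set c := (arr.headD []).length with hc
  have hcn2 : c / 2 ≤ c - c / 2 := by omega
  apply List.ext_getElem
  · simp; omega
  · intro i hi hi'
    simp only [List.length_mapIdx, List.length_replicate] at hi
    rw [List.getElem_mapIdx]
    simp only [List.getElem_replicate, hi, if_pos]
    rw [foldl_set_range _ c (List.replicate c 0) (by simp)]
    simp only [List.drop_replicate, Nat.sub_self, List.replicate_zero, List.append_nil]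
    by_cases htop : i < n / 2
    · rw [List.getElem_append_left (by simpa using htop)]
      simp only [List.getElem_map, List.getElem_range]
      rw [PySem.List.slice_natCast, PySem.List.slice_natCast,
        drop_take_map _ _ _ (by have := hb1 i (by omega); omega),
        drop_take_map _ _ _ (by have := hb2 (i + n / 2) (by omega) (by omega); omega),
        show 2 * (c / 2) - c / 2 = c / 2 from by omega,
        map_range_split _ c (c / 2) (by omega)]
      congr 1
      · apply List.map_congr_left
        intro j hj
        simp only [List.mem_range] at hj
        simp only [fVal, pyAt, PySem.List.pyGetD_natCast, if_pos htop, if_pos hj,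
          Nat.add_comm]
      · apply List.map_congr_left
        intro j hj
        simp only [List.mem_range] at hj
        simp only [fVal, pyAt, PySem.List.pyGetD_natCast, if_pos htop,
          if_neg (show ¬ (c / 2 + j < c / 2) from by omega)]
    · rw [List.getElem_append_right (by simpa using htop)]
      simp only [List.length_map, List.length_range, List.getElem_map, List.getElem_range]
      simp only [PySem.List.slice_zero_start, PySem.List.slice_to_natCast]
      rw [show n / 2 + (i - n / 2) = i from by omega,
        take_map _ _ (by have := hb3 (i - n / 2) (by omega); omega),
        take_map _ _ (by have := hb4 i (by omega) (by omega); omega),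
        map_range_split _ c (c / 2) (by omega)]
      congr 1
      · apply List.map_congr_left
        intro j hj
        simp only [List.mem_range] at hj
        simp only [fVal, pyAt, PySem.List.pyGetD_natCast, if_neg htop, if_pos hj]
      · apply List.map_congr_left
        intro j hj
        simp only [List.mem_range] at hj
        simp only [fVal, pyAt, PySem.List.pyGetD_natCast, if_neg htop,
          if_neg (show ¬ (c / 2 + j < c / 2) from by omega), Nat.add_sub_cancel_left]
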